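-- pv_equiv track=rewrite | github.com/robinbryce/merkle-mountain-range-proofs | algorithms.py | leaf_count
-- ===== SOURCE A (Python) =====
-- def leaf_count(s: int) -> int:
--     """Returns the count of leaf elements in MMR(s)
--
--     The bits of the count also form a mask, where a single bit is set for each
--     "peak" present in the accumulator. The bit position is the height of the
--     binary tree committing the elements to the corresponding accumulator entry.
--
--     The (sparse) accumulator entry is also derived from the height as acc[len(acc) - bitpos]
--
--     Where acc is the list of accumulator peak indices in descending order of
--     height and bitpos is any bit set in the leaf count.
--
--     """
--     if s == 0:
--         return 0
--
--     # peakSize := (uint64(1) << bits.Len64(mmrSize)) - 1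
--     peaksize = (1 << s.bit_length()) - 1
--     peakmap = 0
--     while peaksize > 0:
--         peakmap <<= 1
--         if s >= peaksize:
--             s -= peaksize
--             peakmap |= 1
--         peaksize >>= 1
--
--     return peakmap
-- ===== SOURCE B (Python) =====
-- def leaf_count(s: int) -> int:
--     # A(s) is the largest l >= 0 with 2*l - popcount(l) <= s (that quantity is
--     # strictly increasing in l), found here by a greedy bitwise search from the
--     # high bit down.  For s <= 0 no bit is ever accepted and 0 is returned.
--     l = 0
--     for i in range(s.bit_length() - 1, -1, -1):
--         cand = l + (1 << i)
--         if 2 * cand - bin(cand).count("1") <= s: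
--             l = cand
--     return l
-- ===== Notes on version B (the rewrite author's own statement) =====
-- stated objective: alternative
-- what changed: Replaces A's peak-mask assembly loop (shift peakmap, subtract a 2^k-1 peak per level) by a greedy bitwise search for the largest l with 2*l - popcount(l) <= s, a strictly increasing predicate that characterises A's result.
import Mathlib
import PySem

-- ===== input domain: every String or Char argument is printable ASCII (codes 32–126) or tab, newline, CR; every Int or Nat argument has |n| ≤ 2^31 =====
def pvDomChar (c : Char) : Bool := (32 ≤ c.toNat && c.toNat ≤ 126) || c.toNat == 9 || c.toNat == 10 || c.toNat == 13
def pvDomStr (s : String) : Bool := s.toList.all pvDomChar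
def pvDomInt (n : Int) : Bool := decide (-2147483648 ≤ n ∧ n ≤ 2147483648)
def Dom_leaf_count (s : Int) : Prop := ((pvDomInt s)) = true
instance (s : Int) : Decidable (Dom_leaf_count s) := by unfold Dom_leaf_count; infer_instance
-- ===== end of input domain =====

-- B replaces A's peak-mask assembly loop by a greedy bitwise search for the
-- largest l with 2*l - popcount(l) <= s (objective: alternative algorithm).


-- ===== PORT A =====
-- 'while peaksize > 0' loop of A; 'peakmap <<= 1' is peakmap*2, 'peakmap |= 1'
-- right after the shift is +1 (peakmap is even there), 'peaksize >>= 1' is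
-- floor division by 2: all exact for Python ints here.
def leaf_count_loop (peaksize s peakmap : Int) : Int :=
  if peaksize > 0 then
    if s ≥ peaksize then
      leaf_count_loop (PySem.Int.floordiv peaksize 2) (s - peaksize) (peakmap * 2 + 1)
    else
      leaf_count_loop (PySem.Int.floordiv peaksize 2) s (peakmap * 2)
  else peakmap
termination_by peaksize.toNat
decreasing_by
  all_goals
    rw [PySem.Int.floordiv_eq_ediv_of_pos (by omega)]
    omega

def leaf_count (s : Int) : Int :=
  if s = 0 then 0
  else
    -- peaksize = (1 << s.bit_length()) - 1
    leaf_count_loop (2 ^ PySem.Int.bitLength s - 1) s 0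

-- ===== PORT B =====
-- for-loop 'for i in range(s.bit_length() - 1, -1, -1)' as a structural
-- countdown: counter i+1 processes bit i.  'bin(cand).count("1")' is
-- PySem.Int.bitCount (exact: cand > 0 in every iteration).
def leaf_count_alt_loop (s : Int) : Nat → Int → Int
  | 0, l => l
  | (i + 1), l =>
      let cand := l + 2 ^ i
      leaf_count_alt_loop s i (if 2 * cand - (PySem.Int.bitCount cand : Int) ≤ s then cand else l)

def leaf_count_alt (s : Int) : Int :=
  leaf_count_alt_loop s (PySem.Int.bitLength s) 0

-- ===== PRECONDITION & SPEC =====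
def Spec_leaf_count (s : Int) (out : Int) : Prop := out = leaf_count_alt s
instance (s : Int) (out : Int) : Decidable (Spec_leaf_count s out) := by unfold Spec_leaf_count; infer_instance

-- ===== CLAIM (what is proved, stated in full; the proofs are below) =====
def Claim_equal_leaf_count : Prop := ∀ (s : Int), Dom_leaf_count s → Spec_leaf_count s (leaf_count s)

-- ===== LEMMAS AND PROOFS =====

-- bc n = popcount of n (as a Nat)
def bc (n : Nat) : Nat := PySem.Int.bitCount (n : Int)

theorem bc_zero : bc 0 = 0 := by decide

theorem bc_rec (m : Nat) (h : 0 < m) : bc m = m % 2 + bc (m / 2) := by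
  unfold bc
  exact PySem.Int.bitCount_natCast h

theorem bc_succ_le (n : Nat) : bc (n + 1) ≤ bc n + 1 := by
  induction n using Nat.strong_induction_on with
  | _ n ih =>
    rcases Nat.even_or_odd n with ⟨m, hm⟩ | ⟨m, hm⟩
    · rcases Nat.eq_zero_or_pos n with h0 | h0
      · subst h0; decide
      · have h1 := bc_rec (n + 1) (by omega)
        have h2 := bc_rec n h0
        have e1 : (n + 1) % 2 = 1 := by omega
        have e2 : (n + 1) / 2 = m := by omega
        have e3 : n % 2 = 0 := by omega
        have e4 : n / 2 = m := by omega
        rw [e1, e2] at h1; rw [e3, e4] at h2; omega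
    · have h1 := bc_rec (n + 1) (by omega)
      have h2 := bc_rec n (by omega)
      have e1 : (n + 1) % 2 = 0 := by omega
      have e2 : (n + 1) / 2 = m + 1 := by omega
      have e3 : n % 2 = 1 := by omega
      have e4 : n / 2 = m := by omega
      rw [e1, e2] at h1; rw [e3, e4] at h2
      have := ih m (by omega)
      omega

theorem bc_pow_add : ∀ (n t : Nat), t < 2 ^ n → bc (2 ^ n + t) = bc t + 1 := by
  intro n
  induction n with
  | zero =>
    intro t ht
    interval_cases t
    decide
  | succ n ih =>
    intro t ht
    have hp : 2 ^ (n + 1) = 2 * 2 ^ n := by ring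
    have h1 := bc_rec (2 ^ n + t / 2) (by positivity)
    have hx := bc_rec (2 ^ (n + 1) + t) (by positivity)
    have e1 : (2 ^ (n + 1) + t) % 2 = t % 2 := by omega
    have e2 : (2 ^ (n + 1) + t) / 2 = 2 ^ n + t / 2 := by omega
    rw [e1, e2] at hx
    have hrec := ih (t / 2) (by omega)
    rcases Nat.eq_zero_or_pos t with h0 | h0
    · subst h0
      simp only [Nat.add_zero, Nat.zero_div, Nat.zero_mod] at hx hrec ⊢
      omega
    · have h2 := bc_rec t h0
      omega

-- f l = 2*l - popcount l; A's result is the largest l with f l ≤ s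
def f (l : Nat) : Int := 2 * (l : Int) - (bc l : Int)

theorem f_succ (l : Nat) : f l + 1 ≤ f (l + 1) := by
  have := bc_succ_le l
  unfold f
  push_cast
  omega

theorem f_mono {j k : Nat} (h : j ≤ k) : f j ≤ f k := by
  induction k with
  | zero => simp_all
  | succ k ih =>
    rcases Nat.lt_or_ge j (k + 1) with h' | h'
    · have := f_succ k
      have := ih (by omega)
      omega
    · have : j = k + 1 := by omega
      subst this; exact le_refl _

theorem f_pow (n : Nat) : f (2 ^ n) = 2 * ((2 ^ n : Nat) : Int) - 1 := by
  have h := bc_pow_add n 0 (by positivity)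
  rw [bc_zero, Nat.add_zero] at h
  unfold f
  rw [h]
  push_cast
  ring

theorem f_split (n t : Nat) (ht : t < 2 ^ n) :
    f (2 ^ n + t) = (2 * ((2 ^ n : Nat) : Int) - 1) + f t := by
  have h := bc_pow_add n t ht
  unfold f
  rw [h]
  push_cast
  ring

-- characterisation of A's loop: with peaksize = 2^n - 1, it appends to peakmap
-- the n bits of the unique capped-greedy l
theorem loopA_eq : ∀ (n : Nat) (s pm : Int) (l : Nat),
    0 ≤ s → f l ≤ s → l < 2 ^ n → (s < f (l + 1) ∨ l = 2 ^ n - 1) →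
    leaf_count_loop (((2 ^ n : Nat) : Int) - 1) s pm = pm * ((2 ^ n : Nat) : Int) + l := by
  intro n
  induction n with
  | zero =>
    intro s pm l hs hfl hl _
    have : l = 0 := by omega
    subst this
    rw [leaf_count_loop]
    norm_num
  | succ n ih =>
    intro s pm l hs hfl hl hside
    have hpow : (2 ^ (n + 1) : Nat) = 2 * 2 ^ n := by ring
    have hposN : (0:Nat) < 2 ^ n := by positivity
    have hcast : ((2 ^ (n + 1) : Nat) : Int) = 2 * ((2 ^ n : Nat) : Int) := by
      push_cast [hpow]; ring
    have hpk : (((2 ^ (n + 1) : Nat) : Int) - 1) > 0 := by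
      have : (1:Int) ≤ ((2 ^ (n+1) : Nat) : Int) := by exact_mod_cast Nat.one_le_two_pow
      omega
    have hdiv : PySem.Int.floordiv (((2 ^ (n + 1) : Nat) : Int) - 1) 2 = ((2 ^ n : Nat) : Int) - 1 := by
      rw [PySem.Int.floordiv_eq_ediv_of_pos (by omega)]
      omega
    have hfp : f (2 ^ n) = ((2 ^ (n + 1) : Nat) : Int) - 1 := by
      rw [f_pow n, hcast]
    rw [leaf_count_loop, if_pos hpk]
    by_cases hbr : s ≥ ((2 ^ (n + 1) : Nat) : Int) - 1
    · -- subtract branch: the top bit of l must be set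
      rw [if_pos hbr, hdiv]
      have hlge : 2 ^ n ≤ l := by
        by_contra hlt
        push Not at hlt
        rcases hside with hside | hside
        · have : f (l + 1) ≤ f (2 ^ n) := f_mono (by omega)
          omega
        · omega
      set t : Nat := l - 2 ^ n with htdef
      have hlt : l = 2 ^ n + t := by omega
      have htb : t < 2 ^ n := by omega
      have hfl' : f t ≤ s - (((2 ^ (n + 1) : Nat) : Int) - 1) := by
        have := f_split n t htb
        rw [← hlt] at this
        omega
      have hside' : s - (((2 ^ (n + 1) : Nat) : Int) - 1) < f (t + 1) ∨ t = 2 ^ n - 1 := by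
        rcases Nat.lt_or_ge (t + 1) (2 ^ n) with h' | h'
        · rcases hside with hside | hside
          · left
            have := f_split n (t + 1) h'
            rw [show 2 ^ n + (t + 1) = l + 1 by omega] at this
            omega
          · right; omega
        · right; omega
      have hs' : 0 ≤ s - (((2 ^ (n + 1) : Nat) : Int) - 1) := by
        have : f (2 ^ n) ≤ f l := f_mono hlge
        omega
      have := ih (s - (((2 ^ (n + 1) : Nat) : Int) - 1)) (pm * 2 + 1) t hs' hfl' htb hside'
      rw [this, hlt, hcast]
      push_cast
      ring
    · -- skip branch: the top bit of l is clear
      rw [if_neg hbr, hdiv]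
      push Not at hbr
      have hlt : l < 2 ^ n := by
        by_contra hge
        push Not at hge
        have : f (2 ^ n) ≤ f l := f_mono hge
        omega
      have hside' : s < f (l + 1) ∨ l = 2 ^ n - 1 := by
        rcases hside with hside | hside
        · left; exact hside
        · right; omega
      have := ih s (pm * 2) l hs hfl hlt hside'
      rw [this, hcast]
      ring

-- characterisation of B's loop: greedy keeps f l ≤ s < f (l + 2^i)
theorem loopB_good : ∀ (i : Nat) (l : Nat) (s : Int),
    f l ≤ s → s < f (l + 2 ^ i) →
    ∃ r : Nat, leaf_count_alt_loop s i (l : Int) = (r : Int) ∧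
      f r ≤ s ∧ s < f (r + 1) ∧ r < l + 2 ^ i := by
  intro i
  induction i with
  | zero =>
    intro l s h1 h2
    exact ⟨l, rfl, h1, by simpa using h2, by omega⟩
  | succ i ih =>
    intro l s h1 h2
    rw [leaf_count_alt_loop]
    have hcand : ((l : Int) + 2 ^ i) = ((l + 2 ^ i : Nat) : Int) := by push_cast; ring
    have hcond : (2 * ((l : Int) + 2 ^ i) - (PySem.Int.bitCount ((l : Int) + 2 ^ i) : Int))
        = f (l + 2 ^ i) := by
      rw [hcand]; unfold f bc; push_cast; ring
    by_cases hbr : 2 * ((l : Int) + 2 ^ i) - (PySem.Int.bitCount ((l : Int) + 2 ^ i) : Int) ≤ s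
    · rw [if_pos hbr]
      rw [hcond] at hbr
      have h2' : s < f ((l + 2 ^ i) + 2 ^ i) := by
        rw [show (l + 2 ^ i) + 2 ^ i = l + 2 ^ (i + 1) by ring]
        exact h2
      obtain ⟨r, hr, hr1, hr2, hr3⟩ := ih (l + 2 ^ i) s hbr h2'
      refine ⟨r, ?_, hr1, hr2, by have h2p : (2:Nat) ^ (i+1) = 2 ^ i + 2 ^ i := by ring
                                  omega⟩
      rw [← hr, hcand]
    · rw [if_neg hbr]
      rw [hcond] at hbr
      push Not at hbr
      obtain ⟨r, hr, hr1, hr2, hr3⟩ := ih l s h1 hbr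
      refine ⟨r, hr, hr1, hr2, by have h2p : (2:Nat) ^ (i+1) = 2 ^ i + 2 ^ i := by ring
                                  have hnn : (0:Nat) < 2 ^ i := by positivity
                                  omega⟩

-- for negative s, A's loop never takes the subtract branch and peakmap stays 0
theorem loopA_neg_aux : ∀ (k : Nat) (ps s : Int), ps.toNat ≤ k → s < 0 →
    leaf_count_loop ps s 0 = 0 := by
  intro k
  induction k with
  | zero =>
    intro ps s hk hs
    rw [leaf_count_loop, if_neg (by omega)]
  | succ k ih =>
    intro ps s hk hs
    by_cases hps : ps > 0
    · rw [leaf_count_loop, if_pos hps, if_neg (by omega)]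
      have := ih (PySem.Int.floordiv ps 2) s (by
        rw [PySem.Int.floordiv_eq_ediv_of_pos (by omega)]
        omega) hs
      simpa using this
    · rw [leaf_count_loop, if_neg hps]

-- for negative s, B's loop never accepts a bit
theorem loopB_neg : ∀ (i : Nat) (s : Int), s < 0 → leaf_count_alt_loop s i 0 = 0 := by
  intro i
  induction i with
  | zero => intro s hs; rfl
  | succ i ih =>
    intro s hs
    rw [leaf_count_alt_loop]
    have hcand : ((0 : Int) + 2 ^ i) = ((2 ^ i : Nat) : Int) := by push_cast; ring
    have hbc : (PySem.Int.bitCount ((0 : Int) + 2 ^ i) : Int) = 1 := by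
      rw [hcand]
      have h := bc_pow_add i 0 (by positivity)
      rw [bc_zero] at h
      unfold bc at h
      rw [show (2 ^ i + 0 : Nat) = 2 ^ i by ring] at h
      exact_mod_cast h
    have hpos : (0:Int) < 2 ^ i := by positivity
    rw [if_neg (by rw [hbc]; omega)]
    exact ih s hs

-- ===== VERDICT (by name: the statement is the Claim_ definition above) =====
theorem leaf_count_spec : Claim_equal_leaf_count := by
  intro s _
  unfold Spec_leaf_count leaf_count leaf_count_alt
  rcases lt_trichotomy s 0 with hs | hs | hs
  · rw [if_neg (by omega)]
    rw [loopA_neg_aux ((2:Int) ^ PySem.Int.bitLength s - 1).toNat ((2:Int) ^ PySem.Int.bitLength s - 1) s (le_refl _) hs]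
    rw [loopB_neg _ s hs]
  · subst hs
    decide
  · rw [if_neg (by omega)]
    set n := PySem.Int.bitLength s with hn
    have hlt : s.natAbs < 2 ^ n := PySem.Int.lt_two_pow_bitLength s
    have hsn : s < ((2 ^ n : Nat) : Int) := by
      have : s = (s.natAbs : Int) := by omega
      rw [this]
      exact_mod_cast hlt
    have hub : s < f (0 + 2 ^ n) := by
      rw [show (0 + 2 ^ n : Nat) = 2 ^ n by ring, f_pow]
      have : ((1:Nat) : Int) ≤ ((2 ^ n : Nat) : Int) := by exact_mod_cast Nat.one_le_two_pow
      omega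
    have hlb : f 0 ≤ s := by unfold f; rw [bc_zero]; push_cast; omega
    obtain ⟨r, hr, hr1, hr2, hr3⟩ := loopB_good n 0 s hlb hub
    rw [show ((0:Nat) : Int) = (0:Int) by rfl] at hr
    rw [hr]
    have hcast : (2 ^ n - 1 : Int) = ((2 ^ n : Nat) : Int) - 1 := by push_cast; ring
    rw [hcast]
    rw [loopA_eq n s 0 r (by omega) hr1 (by omega) (Or.inl hr2)]
    ring
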